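-- pv_equiv track=rewrite | github.com/always-spring01/- | 문자열 조작/937. Recorder Log Files.py | recorderLogFiles1
-- ===== SOURCE A (Python) =====
-- def recorderLogFiles1(logs: list[str]) -> list[str]:
--     letters, digits = [], []
--     for log in logs:
--         if log.split()[1].isdigit():
--             digits.append(log)
--         else:
--             letters.append(log)
--
--     # TODO : Lambda 사용법에 대해 추가 공부 필요
--     # 2개의 키를 람다 표현식으로 정렬
--     # x.split()[1:]을 1번째 key, 이게 동일하다면 x.split()[0]을 2번째 key로 설정해서 정렬한다
--     letters.sort(key=lambda x: (x.split()[1:], x.split()[0]))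
--     return letters + digits
-- ===== SOURCE B (Python) =====
-- def recorderLogFiles1(logs: list[str]) -> list[str]:
--     # One stable sort of the whole list with a composite key: digit-logs get the
--     # constant key (1, []) so they stay after all letter-logs in original order;
--     # a letter-log's key lists its content tokens, then '' (smaller than any
--     # token, so shorter content sorts first exactly as tuple comparison would),
--     # then its identifier.
--     def key(log):
--         t = log.split()
--         if t[1].isdigit():
--             return (1, [])
--         return (0, t[1:] + [''] + [t[0]])
--     return sorted(logs, key=key)
-- ===== Notes on version B (the rewrite author's own statement) =====
-- stated objective: simpler
-- what changed: A partitions logs into letter- and digit-logs, sorts the letter list with a two-part key and concatenates; B performs one stable sort of the whole list under a composite key ((1, []) for digit-logs, (0, content + [''] + [id]) for letter-logs), with no partition pass and no concatenation.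
import Mathlib
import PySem

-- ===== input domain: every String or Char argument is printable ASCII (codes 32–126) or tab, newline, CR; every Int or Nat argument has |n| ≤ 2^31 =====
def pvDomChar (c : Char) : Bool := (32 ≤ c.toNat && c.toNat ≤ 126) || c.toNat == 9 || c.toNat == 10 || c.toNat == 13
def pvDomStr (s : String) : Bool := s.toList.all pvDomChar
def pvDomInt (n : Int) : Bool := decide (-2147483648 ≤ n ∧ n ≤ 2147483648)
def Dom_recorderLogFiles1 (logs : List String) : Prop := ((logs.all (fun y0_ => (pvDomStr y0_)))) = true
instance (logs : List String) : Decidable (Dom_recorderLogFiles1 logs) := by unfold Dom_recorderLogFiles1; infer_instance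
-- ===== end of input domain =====

-- B replaces A's partition-sort-concatenate with ONE stable sort of the whole list under a
-- composite key (objective: simpler — a single pass through sorted with one key function).

-- ===== PORT A =====
-- log.split()[1].isdigit()  (the default [] makes the port total; Pre_ puts the real domain)
def pvP (log : String) : Bool :=
  PySem.Chars.strIsdigit (PySem.List.pyGetD (PySem.Chars.split₀ log.toList) 1 [])

-- x.split()[1:]  and  x.split()[0], the two components of A's sort key
def pvK1 (x : String) : List (List Char) :=
  PySem.List.slice (PySem.Chars.split₀ x.toList) (some 1) none
def pvK2 (x : String) : List Char :=
  PySem.List.pyGetD (PySem.Chars.split₀ x.toList) 0 []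

def recorderLogFiles1 (logs : List String) : List String :=
  let pr := logs.foldl
    (fun (acc : List String × List String) log =>
      if pvP log then (acc.1, acc.2 ++ [log]) else (acc.1 ++ [log], acc.2))
    ([], [])
  PySem.List.sorted2 pr.1 pvK1 pvK2 ++ pr.2

-- ===== PORT B =====
-- B's key(log): (1, []) for digit-logs, (0, t[1:] + [''] + [t[0]]) for letter-logs
def pvAltKey (log : String) : Int × List (List Char) :=
  let t := PySem.Chars.split₀ log.toList
  if pvP log then (1, [])
  else (0, PySem.List.slice t (some 1) none ++ [[]] ++ [PySem.List.pyGetD t 0 []])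

def recorderLogFiles1_alt (logs : List String) : List String :=
  PySem.List.sorted2 logs (fun log => (pvAltKey log).1) (fun log => (pvAltKey log).2)

-- ===== PRECONDITION & SPEC =====
-- Python A raises IndexError on any log with fewer than two whitespace-separated tokens.
def Pre_recorderLogFiles1 (logs : List String) : Prop :=
  ∀ log ∈ logs, 2 ≤ (PySem.Chars.split₀ log.toList).length
instance (logs : List String) : Decidable (Pre_recorderLogFiles1 logs) := by
  unfold Pre_recorderLogFiles1; infer_instance

def pvWitness_recorderLogFiles1 : List String :=
  ["dig1 8 1 5 1", "let1 art can", "let2 own kit dig", "dig2 3 6", "let3 art zero"]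

def Spec_recorderLogFiles1 (logs : List String) (out : List String) : Prop :=
  out = recorderLogFiles1_alt logs
instance (logs : List String) (out : List String) : Decidable (Spec_recorderLogFiles1 logs out) := by
  unfold Spec_recorderLogFiles1; infer_instance

-- ===== CLAIM (what is proved, stated in full; the proofs are below) =====
def Claim_equal_recorderLogFiles1 : Prop :=
  ∀ (logs : List String), Dom_recorderLogFiles1 logs → Pre_recorderLogFiles1 logs →
    Spec_recorderLogFiles1 logs (recorderLogFiles1 logs)

-- ===== LEMMAS AND PROOFS =====

-- A's letter-sort comparison and B's whole-list comparison, as "before" predicates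
def pvBA (a b : String) : Bool :=
  decide (pvK1 a < pvK1 b) || (!decide (pvK1 b < pvK1 a) && decide (pvK2 a < pvK2 b))
def pvBB (a b : String) : Bool :=
  decide ((pvAltKey a).1 < (pvAltKey b).1) ||
    (!decide ((pvAltKey b).1 < (pvAltKey a).1) && decide ((pvAltKey a).2 < (pvAltKey b).2))

lemma pv_sorted2_eq_foldl {α κ₁ κ₂ : Type} [LT κ₁] [DecidableLT κ₁] [LT κ₂] [DecidableLT κ₂]
    (xs : List α) (k1 : α → κ₁) (k2 : α → κ₂) :
    PySem.List.sorted2 xs k1 k2 false =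
      xs.foldl (fun acc x => PySem.List.insertBy
        (fun a b => decide (k1 a < k1 b) || (!decide (k1 b < k1 a) && decide (k2 a < k2 b)))
        x acc) [] := rfl


lemma pv_nil_lt_of_ne (t : List Char) (h : t ≠ []) : ([] : List Char) < t := by
  cases t with
  | nil => exact absurd rfl h
  | cons a b => exact List.nil_lt_cons a b

lemma pv_split₀_go_ne_nil :
    ∀ (s cur : List Char) (acc : List (List Char)), (∀ t ∈ acc, t ≠ []) →
      ∀ t ∈ PySem.Chars.split₀.go s cur acc, t ≠ [] := by
  intro s
  induction s with
  | nil =>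
    intro cur acc hacc t ht
    simp only [PySem.Chars.split₀.go] at ht
    by_cases h : cur.isEmpty
    · simp [h] at ht; exact hacc t ht
    · simp [h] at ht
      rcases ht with h1 | h1
      · exact hacc t h1
      · subst h1; simp [List.isEmpty_iff] at h; simp [h]
  | cons c rest ih =>
    intro cur acc hacc t ht
    simp only [PySem.Chars.split₀.go] at ht
    by_cases hs : PySem.Chars.isspace c
    · by_cases h : cur.isEmpty
      · simp [hs, h] at ht; exact ih [] acc hacc t ht
      · simp [hs, h] at ht
        refine ih [] _ ?_ t ht
        intro u hu
        rcases List.mem_cons.mp hu with h1 | h1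
        · subst h1; simp [List.isEmpty_iff] at h; simp [h]
        · exact hacc u h1
    · simp [hs] at ht; exact ih (c :: cur) acc hacc t ht

lemma pv_token_ne_nil (s : List Char) : ∀ t ∈ PySem.Chars.split₀ s, t ≠ [] := by
  intro t ht
  exact pv_split₀_go_ne_nil s [] [] (by simp) t ht

-- crux: the flattened letter key compares exactly like Python's pair (content, id)
lemma pv_enc_lt_iff :
    ∀ (c1 c2 : List (List Char)) (i1 i2 : List Char),
      (∀ t ∈ c1, t ≠ []) → (∀ t ∈ c2, t ≠ []) →
      (c1 ++ [[], i1] < c2 ++ [[], i2] ↔ c1 < c2 ∨ (¬ c2 < c1 ∧ i1 < i2)) := by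
  intro c1
  induction c1 with
  | nil =>
    intro c2 i1 i2 _ h2
    cases c2 with
    | nil =>
      simp [List.cons_lt_cons_iff]
    | cons t2 c2' =>
      have hnil : ([] : List Char) < t2 := pv_nil_lt_of_ne t2 (h2 t2 (by simp))
      simp [List.cons_lt_cons_iff, List.nil_lt_cons, hnil, ne_of_gt hnil]
  | cons t1 c1' ih =>
    intro c2 i1 i2 h1 h2
    cases c2 with
    | nil =>
      have hnil : ([] : List Char) < t1 := pv_nil_lt_of_ne t1 (h1 t1 (by simp))
      simp [List.cons_lt_cons_iff, List.not_lt_nil, List.nil_lt_cons, asymm hnil, ne_of_gt hnil]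
    | cons t2 c2' =>
      simp only [List.cons_append, List.cons_lt_cons_iff]
      by_cases h12 : t1 < t2
      · simp [h12, asymm h12]
      · by_cases h21 : t2 < t1
        · simp [h21, asymm h21, ne_of_gt h21]
        · have heq : t1 = t2 := List.le_antisymm h21 h12
          subst heq
          have hrec := ih c2' i1 i2 (fun t ht => h1 t (by simp [ht])) (fun t ht => h2 t (by simp [ht]))
          simp [hrec]

lemma pvAltKey_eq (x : String) :
    pvAltKey x = if pvP x then (1, []) else (0, pvK1 x ++ [[], pvK2 x]) := by
  simp [pvAltKey, pvK1, pvK2]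

lemma pv_bB_digit (x y : String) (hx : pvP x = true) : pvBB x y = false := by
  by_cases hy : pvP y
  · simp [pvBB, pvAltKey_eq, hx, hy]
  · simp [pvBB, pvAltKey_eq, hx, hy]

lemma pv_bB_letter_digit (x y : String) (hx : pvP x = false) (hy : pvP y = true) :
    pvBB x y = true := by
  simp [pvBB, pvAltKey_eq, hx, hy]

lemma pv_bB_letter (x y : String) (hx : pvP x = false) (hy : pvP y = false) :
    pvBB x y = pvBA x y := by
  have hmem : ∀ (z : String) (t : List (List Char)), t = pvK1 z → ∀ u ∈ t, u ≠ [] := by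
    intro z t ht u hu
    subst ht
    rw [pvK1, PySem.List.slice_from (PySem.Chars.split₀ z.toList) (a := 1) (by norm_num)] at hu
    exact pv_token_ne_nil z.toList u (List.mem_of_mem_drop hu)
  have hiff := pv_enc_lt_iff (pvK1 x) (pvK1 y) (pvK2 x) (pvK2 y)
    (hmem x _ rfl) (hmem y _ rfl)
  have hle : decide (pvK1 x ≤ pvK1 y) = !decide (pvK1 y < pvK1 x) := by
    rw [← decide_not]
    exact decide_eq_decide.mpr (Iff.symm Std.not_lt)
  simp [pvBB, pvBA, pvAltKey_eq, hx, hy, hiff, hle]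

lemma pv_insertBy_split (b b' : String → String → Bool) (x : String) :
    ∀ (L D : List String), (∀ y ∈ L, b x y = b' x y) → (∀ d ∈ D, b x d = true) →
      PySem.List.insertBy b x (L ++ D) = PySem.List.insertBy b' x L ++ D := by
  intro L
  induction L with
  | nil =>
    intro D _ hD
    cases D with
    | nil => simp [PySem.List.insertBy]
    | cons d D' => simp [PySem.List.insertBy, hD d (by simp)]
  | cons y L' ih =>
    intro D hL hD
    have hy := hL y (by simp)
    simp only [List.cons_append, PySem.List.insertBy, hy]
    by_cases hb : b' x y
    · simp [hb]
    · simp [hb, ih D (fun z hz => hL z (by simp [hz])) hD]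

lemma pv_main :
    ∀ (ls L D : List String), (∀ x ∈ L, pvP x = false) → (∀ x ∈ D, pvP x = true) →
      ls.foldl (fun acc x => PySem.List.insertBy pvBB x acc) (L ++ D) =
        (ls.filter (fun x => !pvP x)).foldl (fun acc x => PySem.List.insertBy pvBA x acc) L ++
          (D ++ ls.filter pvP) := by
  intro ls
  induction ls with
  | nil => intro L D _ _; simp
  | cons x ls' ih =>
    intro L D hL hD
    by_cases hx : pvP x
    · have hstep : PySem.List.insertBy pvBB x (L ++ D) = (L ++ D) ++ [x] :=
        PySem.List.insertBy_of_forall_not_before _ _ _ (fun y _ => pv_bB_digit x y hx)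
      have := ih L (D ++ [x]) hL (by
        intro z hz
        rcases List.mem_append.mp hz with h | h
        · exact hD z h
        · simp at h; subst h; exact hx)
      simp only [List.foldl_cons, hstep, List.append_assoc] at this ⊢
      rw [this]
      simp [hx]
    · have hstep : PySem.List.insertBy pvBB x (L ++ D) = PySem.List.insertBy pvBA x L ++ D :=
        pv_insertBy_split pvBB pvBA x L D
          (fun y hy => pv_bB_letter x y (by simp [hx]) (hL y hy))
          (fun d hd => pv_bB_letter_digit x d (by simp [hx]) (hD d hd))
      have := ih (PySem.List.insertBy pvBA x L) D (by
        intro z hz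
        rcases (PySem.List.mem_insertBy _ _ _ _).mp hz with h | h
        · subst h; simp [hx]
        · exact hL z h) hD
      simp only [List.foldl_cons, hstep]
      rw [this]
      simp [hx]

lemma pv_partition_fold :
    ∀ (ls A B : List String),
      ls.foldl (fun acc x => if pvP x then (acc.1, acc.2 ++ [x]) else (acc.1 ++ [x], acc.2)) (A, B)
        = (A ++ ls.filter (fun x => !pvP x), B ++ ls.filter pvP) := by
  intro ls
  induction ls with
  | nil => intro A B; simp
  | cons x ls' ih =>
    intro A B
    by_cases hx : pvP x
    · simp [hx, ih, List.append_assoc]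
    · simp [hx, ih, List.append_assoc]

-- ===== VERDICT (by name: the statement is the Claim_ definition above) =====
theorem recorderLogFiles1_spec : Claim_equal_recorderLogFiles1 := by
  intro logs _hdom _hpre
  unfold Spec_recorderLogFiles1
  show recorderLogFiles1 logs = recorderLogFiles1_alt logs
  rw [recorderLogFiles1, recorderLogFiles1_alt]
  rw [pv_partition_fold]
  rw [pv_sorted2_eq_foldl, pv_sorted2_eq_foldl]
  have hmain := pv_main logs [] [] (by simp) (by simp)
  simp only [List.nil_append] at hmain ⊢
  exact (hmain).symm ▸ rfl
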